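-- pv_equiv track=rewrite | github.com/pypi-data/pypi-mirror-403 | packages/bitbully/bitbully-0.0.75.tar.gz/bitbully-0.0.75/tests/test_docstrings.py | pair_python_with_expected
-- ===== SOURCE A (Python) =====
-- def pair_python_with_expected(blocks: list[tuple[str, str]]) -> list[tuple[str, str | None]]:
--     """Pair Python code blocks with an optional following expected-output block.
--
--     A Python block (`python` or `py`) is paired with the next block if that next
--     block is a non-Python output block (language in `{"", "text", "txt", "none"}`).
--     The paired non-Python block is treated as expected stdout.
--
--     Args:
--         blocks (list[tuple[str, str]]): Sequence of `(language, body)` blocks.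
--
--     Returns:
--         list[tuple[str, str | None]]: List of `(python_code, expected_stdout)` pairs.
--             `expected_stdout` is `None` if no matching output block follows.
--     """
--     pairs: list[tuple[str, str | None]] = []
--     i = 0
--     while i < len(blocks):
--         lang, body = blocks[i]
--         if lang in {"python", "py"}:
--             expected: str | None = None
--             if i + 1 < len(blocks) and blocks[i + 1][0] in {"", "text", "txt", "none"}:
--                 expected = blocks[i + 1][1]
--                 i += 1  # consume expected
--             pairs.append((body, expected))
--         i += 1
--     return pairs
-- ===== SOURCE B (Python) =====
-- def pair_python_with_expected(blocks):
--     """Pair Python code blocks with an optional following expected-output block."""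
--     out_langs = {"", "text", "txt", "none"}
--     nexts = blocks[1:] + [None]
--     return [
--         (body, nxt[1] if nxt is not None and nxt[0] in out_langs else None)
--         for (lang, body), nxt in zip(blocks, nexts)
--         if lang in ("python", "py")
--     ]
-- ===== Notes on version B (the rewrite author's own statement) =====
-- stated objective: simpler
-- what changed: Replaced the mutable-index while loop with its consume-next branch by a single comprehension that zips each block with its successor (lookahead); output blocks need not be consumed because non-python blocks are filtered out anyway.
import Mathlib
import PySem

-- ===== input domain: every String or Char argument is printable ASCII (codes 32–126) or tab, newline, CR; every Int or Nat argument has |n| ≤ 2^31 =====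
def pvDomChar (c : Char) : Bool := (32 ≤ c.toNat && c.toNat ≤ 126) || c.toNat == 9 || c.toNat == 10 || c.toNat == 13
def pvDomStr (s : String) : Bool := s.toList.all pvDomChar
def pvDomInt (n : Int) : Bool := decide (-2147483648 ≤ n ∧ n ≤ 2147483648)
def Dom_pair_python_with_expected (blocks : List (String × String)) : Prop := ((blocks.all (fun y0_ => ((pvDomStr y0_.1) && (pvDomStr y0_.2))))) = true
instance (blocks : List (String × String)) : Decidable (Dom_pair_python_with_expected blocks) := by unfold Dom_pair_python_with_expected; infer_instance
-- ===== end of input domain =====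

-- B replaces A's mutable-index while loop (with a "consume next block" branch) by a
-- single zip-with-successor comprehension; objective: simpler.


-- ===== PORT A =====
-- A's while loop over index i, with the branch that consumes the expected-output block (i += 2)
def pairGoA (blocks : List (String × String)) (i : Nat) : List (String × Option String) :=
  if h : i < blocks.length then
    let lang := (blocks[i]).1
    let body := (blocks[i]).2
    if lang == "python" || lang == "py" then
      if h2 : i + 1 < blocks.length then
        if (blocks[i+1]).1 == "" || (blocks[i+1]).1 == "text" || (blocks[i+1]).1 == "txt" || (blocks[i+1]).1 == "none" then
          (body, some (blocks[i+1]).2) :: pairGoA blocks (i+2)   -- consume expected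
        else
          (body, none) :: pairGoA blocks (i+1)
      else
        (body, none) :: pairGoA blocks (i+1)
    else
      pairGoA blocks (i+1)
  else
    []
termination_by blocks.length - i

def pair_python_with_expected (blocks : List (String × String)) : List (String × Option String) :=
  pairGoA blocks 0

-- ===== PORT B =====
-- zip each block with its successor (None for the last one), filter python blocks
def pair_python_with_expected_alt (blocks : List (String × String)) : List (String × Option String) :=
  (blocks.zip ((blocks.drop 1).map some ++ [none])).filterMap fun p =>
    if p.1.1 == "python" || p.1.1 == "py" then
      some (p.1.2,
        match p.2 with
        | some nxt =>
          if nxt.1 == "" || nxt.1 == "text" || nxt.1 == "txt" || nxt.1 == "none" then some nxt.2 else none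
        | none => none)
    else none

-- ===== PRECONDITION & SPEC =====
def Spec_pair_python_with_expected (blocks : List (String × String)) (out : List (String × Option String)) : Prop := out = pair_python_with_expected_alt blocks
instance (blocks : List (String × String)) (out : List (String × Option String)) : Decidable (Spec_pair_python_with_expected blocks out) := by unfold Spec_pair_python_with_expected; infer_instance

-- ===== CLAIM (what is proved, stated in full; the proofs are below) =====
def Claim_equal_pair_python_with_expected : Prop := ∀ (blocks : List (String × String)), Dom_pair_python_with_expected blocks → Spec_pair_python_with_expected blocks (pair_python_with_expected blocks)

-- ===== LEMMAS AND PROOFS =====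

-- intermediate head-pattern recursion, common ground between the two ports
def pairGoH : List (String × String) → List (String × Option String)
  | [] => []
  | x :: rest =>
    if x.1 == "python" || x.1 == "py" then
      (x.2, match rest with
            | y :: _ =>
              if y.1 == "" || y.1 == "text" || y.1 == "txt" || y.1 == "none" then some y.2 else none
            | [] => none) :: pairGoH rest
    else
      pairGoH rest

theorem alt_eq_goH (blocks : List (String × String)) :
    pair_python_with_expected_alt blocks = pairGoH blocks := by
  induction blocks with
  | nil => rfl
  | cons x rest ih =>
    cases rest with
    | nil =>
      simp only [pair_python_with_expected_alt, pairGoH, List.drop_one, List.tail_cons,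
        List.map_nil, List.nil_append, List.zip_cons_cons, List.zip_nil_left,
        List.filterMap_cons, List.filterMap_nil]
      by_cases hpy : (x.1 == "python" || x.1 == "py") = true <;> simp [hpy]
    | cons y rest' =>
      simp only [pair_python_with_expected_alt, List.drop_one, List.tail_cons,
        List.map_cons, List.cons_append, List.zip_cons_cons, List.filterMap_cons] at ih ⊢
      rw [ih]
      by_cases hpy : (x.1 == "python" || x.1 == "py") = true <;> simp [pairGoH, hpy]

theorem goH_skip_out (y : String × String) (rest : List (String × String))
    (h : (y.1 == "" || y.1 == "text" || y.1 == "txt" || y.1 == "none") = true) :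
    pairGoH (y :: rest) = pairGoH rest := by
  have hnp : (y.1 == "python" || y.1 == "py") = false := by
    rcases Bool.or_eq_true_iff.1 h with h' | h4
    · rcases Bool.or_eq_true_iff.1 h' with h'' | h3
      · rcases Bool.or_eq_true_iff.1 h'' with h1 | h2
        · simp_all
        · simp_all
      · simp_all
    · simp_all
  simp [pairGoH, hnp]

theorem goH_py_cons (x y : String × String) (rest : List (String × String))
    (hpy : (x.1 == "python" || x.1 == "py") = true) :
    pairGoH (x :: y :: rest) =
      (x.2, if (y.1 == "" || y.1 == "text" || y.1 == "txt" || y.1 == "none") = true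
            then some y.2 else none) :: pairGoH (y :: rest) := by
  conv_lhs => rw [pairGoH]
  simp [hpy]

theorem goH_py_nil (x : String × String)
    (hpy : (x.1 == "python" || x.1 == "py") = true) :
    pairGoH [x] = [(x.2, none)] := by
  simp [pairGoH, hpy]

theorem goH_not_py (x : String × String) (rest : List (String × String))
    (hpy : ¬ (x.1 == "python" || x.1 == "py") = true) :
    pairGoH (x :: rest) = pairGoH rest := by
  conv_lhs => rw [pairGoH.eq_def]
  simp [hpy]

theorem goA_eq_goH (blocks : List (String × String)) :
    ∀ n i, blocks.length - i ≤ n → pairGoA blocks i = pairGoH (blocks.drop i) := by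
  intro n
  induction n with
  | zero =>
    intro i hi
    have hlen : blocks.length ≤ i := by omega
    rw [pairGoA]
    simp [List.drop_eq_nil_of_le hlen, pairGoH, Nat.not_lt.2 hlen]
  | succ n ih =>
    intro i hi
    rw [pairGoA]
    by_cases h : i < blocks.length
    · have hdrop : blocks.drop i = blocks[i] :: blocks.drop (i + 1) :=
        List.drop_eq_getElem_cons h
      simp only [dif_pos h]
      by_cases hpy : ((blocks[i]).1 == "python" || (blocks[i]).1 == "py") = true
      · simp only [hpy, if_pos]
        by_cases h2 : i + 1 < blocks.length
        · have hdrop2 : blocks.drop (i + 1) = blocks[i+1] :: blocks.drop (i + 2) :=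
            List.drop_eq_getElem_cons h2
          rw [hdrop, hdrop2, goH_py_cons _ _ _ hpy]
          by_cases hout : ((blocks[i+1]).1 == "" || (blocks[i+1]).1 == "text" ||
              (blocks[i+1]).1 == "txt" || (blocks[i+1]).1 == "none") = true
          · simp only [dif_pos h2, if_pos hout]
            rw [goH_skip_out _ _ hout, ih (i + 2) (by omega)]
          · simp only [dif_pos h2, if_neg hout]
            rw [ih (i + 1) (by omega), hdrop2]
        · have hdrop2 : blocks.drop (i + 1) = [] :=
            List.drop_eq_nil_of_le (by omega)
          simp only [dif_neg h2]
          rw [hdrop, hdrop2, goH_py_nil _ hpy, ih (i + 1) (by omega), hdrop2]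
          rfl
      · simp only [hpy, Bool.false_eq_true, if_false]
        rw [hdrop, goH_not_py _ _ hpy]
        exact ih (i + 1) (by omega)
    · simp [dif_neg h, List.drop_eq_nil_of_le (Nat.not_lt.1 h), pairGoH]

-- ===== VERDICT (by name: the statement is the Claim_ definition above) =====
theorem pair_python_with_expected_spec : Claim_equal_pair_python_with_expected := by
  intro blocks _
  unfold Spec_pair_python_with_expected pair_python_with_expected
  rw [alt_eq_goH, goA_eq_goH blocks blocks.length 0 (by omega)]
  simp
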